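-- pv_equiv track=rewrite | github.com/ut-dacs/https-ids | lib/functions.py | automation_signatures
-- ===== SOURCE A (Python) =====
-- def automation_signatures(signatures, config):
--   """Function for converting configured signatures into numbers 'main.py' understands.
--
--   :param signatures: dictionary of available signatures
--   :type signatures: dictionary
--   :param config: configured signatures
--   :type config: string
--   :return: a string of signatures main.py understands
--   """
--   config = config.replace(" ", "").split(",")
--   numbers = []
--   for i,signature in enumerate(sorted(signatures)):
--     if signature in config:
--       numbers.append(str(i+1))
--   numbers = ",".join(numbers)
--   return numbers
-- ===== SOURCE B (Python) =====
-- def automation_signatures(signatures, config):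
--   pos = {sig: i + 1 for i, sig in enumerate(sorted(signatures))}
--   wanted = set(config.replace(" ", "").split(","))
--   found = sorted(pos[name] for name in wanted if name in pos)
--   return ",".join(str(n) for n in found)
-- ===== Notes on version B (the rewrite author's own statement) =====
-- stated objective: alternative
-- what changed: Instead of scanning the whole config list for every sorted signature, B builds a signature->position dict once, deduplicates the config into a set, looks each config name up in the dict, and sorts the collected positions before joining.
import Mathlib
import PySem

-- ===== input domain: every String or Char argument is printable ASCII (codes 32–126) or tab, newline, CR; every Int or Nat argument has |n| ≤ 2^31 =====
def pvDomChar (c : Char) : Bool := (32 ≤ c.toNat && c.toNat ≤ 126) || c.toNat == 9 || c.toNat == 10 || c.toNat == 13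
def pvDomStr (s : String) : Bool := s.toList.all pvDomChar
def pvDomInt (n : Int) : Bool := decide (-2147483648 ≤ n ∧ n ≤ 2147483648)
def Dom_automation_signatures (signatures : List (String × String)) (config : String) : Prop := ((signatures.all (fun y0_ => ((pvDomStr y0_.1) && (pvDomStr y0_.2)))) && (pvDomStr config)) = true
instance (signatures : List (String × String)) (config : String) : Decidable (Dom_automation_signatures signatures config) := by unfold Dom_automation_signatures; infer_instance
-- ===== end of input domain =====

-- B replaces A's per-signature scans of the config list by a position dictionary over the
-- sorted signatures plus a deduplicated config set, sorting the collected indices at the end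
-- (objective: alternative decomposition; same observable return value).

-- ===== PORT A =====
def automation_signatures (signatures : List (String × String)) (config : String) : String :=
  let cfgList := (PySem.Str.split? (PySem.Str.replace config " " "") ",").getD []
  let sortedKeys := PySem.List.sorted (PySem.Dict.ofList signatures).keys (fun s => s) false
  let numbers := (PySem.List.enumerate sortedKeys 0).foldl
    (fun acc p => if p.2 ∈ cfgList then acc ++ [PySem.Int.toStr (p.1 + 1)] else acc) []
  PySem.Str.join "," numbers

-- ===== PORT B =====
def automation_signatures_alt (signatures : List (String × String)) (config : String) : String :=
  let sortedKeys := PySem.List.sorted (PySem.Dict.ofList signatures).keys (fun s => s) false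
  let pos : PySem.Dict String Int :=
    (PySem.List.enumerate sortedKeys 0).foldl (fun d p => d.insert p.2 (p.1 + 1)) PySem.Dict.empty
  let wanted : PySem.Set String :=
    PySem.Set.ofList ((PySem.Str.split? (PySem.Str.replace config " " "") ",").getD [])
  let found := PySem.List.sorted
    ((wanted.filter (fun n => pos.contains n)).map (fun n => pos.getD n 0)) (fun x => x) false
  PySem.Str.join "," (found.map (fun n => PySem.Int.toStr n))

-- ===== PRECONDITION & SPEC =====
def Spec_automation_signatures (signatures : List (String × String)) (config : String) (out : String) : Prop := out = automation_signatures_alt signatures config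
instance (signatures : List (String × String)) (config : String) (out : String) : Decidable (Spec_automation_signatures signatures config out) := by unfold Spec_automation_signatures; infer_instance

-- ===== CLAIM (what is proved, stated in full; the proofs are below) =====
def Claim_equal_automation_signatures : Prop := ∀ (signatures : List (String × String)) (config : String), Dom_automation_signatures signatures config → Spec_automation_signatures signatures config (automation_signatures signatures config)

-- ===== LEMMAS AND PROOFS =====

-- the position dictionary built from the enumerated sorted keys has exactly those pairs as items
theorem pos_items (ks : List String) (hnd : ks.Nodup) :
    ((PySem.List.enumerate ks 0).foldl (fun d p => d.insert p.2 (p.1 + 1)) PySem.Dict.empty).items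
      = (PySem.List.enumerate ks 0).map (fun p => (p.2, p.1 + 1)) := by
  have h := PySem.Dict.items_foldl_insert_fresh (l := PySem.List.enumerate ks 0)
    (k := fun p => p.2) (v := fun p => p.1 + 1) (d := (PySem.Dict.empty : PySem.Dict String Int))
    (by intro a _; simp [PySem.Dict.contains_empty])
    (by simpa [PySem.List.map_snd_enumerate] using hnd)
  simpa [PySem.Dict.items] using h

theorem main_eq (signatures : List (String × String)) (config : String) :
    automation_signatures signatures config = automation_signatures_alt signatures config := by
  unfold automation_signatures automation_signatures_alt
  simp only []
  set cfgList := (PySem.Str.split? (PySem.Str.replace config " " "") ",").getD [] with hcfg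
  set ks := PySem.List.sorted (PySem.Dict.ofList signatures).keys (fun s => s) false with hksdef
  set pos := (PySem.List.enumerate ks 0).foldl (fun d p => d.insert p.2 (p.1 + 1)) PySem.Dict.empty with hposdef
  have hndks : ks.Nodup := (PySem.List.sorted_perm _ _ _).symm.nodup (PySem.Dict.nodup_keys_ofList signatures)
  have hitems := pos_items ks hndks
  have hkeys : pos.keys = ks := by
    show pos.items.map (·.1) = ks
    rw [hitems, List.map_map]
    simp [Function.comp_def]
  have hndpos : pos.keys.Nodup := hkeys ▸ hndks
  have hgetD : ∀ (k : Nat) (h : k < ks.length), pos.getD ks[k] 0 = (k : Int) + 1 := by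
    intro k h
    refine PySem.Dict.getD_of_mem_items pos ?_ hndpos 0
    rw [hitems]
    refine List.mem_map.mpr ⟨((k : Int), ks[k]), ?_, rfl⟩
    rw [PySem.List.mem_enumerate_iff]
    exact ⟨k, h, by simp⟩
  have hcont : ∀ n, pos.contains n = decide (n ∈ ks) := fun n => by
    rw [PySem.Dict.contains_eq_decide_mem_keys, hkeys]
  -- A's loop
  rw [PySem.List.foldl_append_ite (p := fun p : Int × String => p.2 ∈ cfgList)
    (f := fun p => PySem.Int.toStr (p.1 + 1))]
  set AIdx := ((PySem.List.enumerate ks 0).filter (fun p => decide (p.2 ∈ cfgList))).map (fun p => p.1 + 1) with hA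
  have hAnum : List.map (fun p : Int × String => PySem.Int.toStr (p.1 + 1))
      ((PySem.List.enumerate ks 0).filter (fun p => decide (p.2 ∈ cfgList)))
      = AIdx.map (fun n => PySem.Int.toStr n) := by
    rw [hA, List.map_map]; rfl
  set BRaw := ((PySem.Set.ofList cfgList).filter (fun n => pos.contains n)).map (fun n => pos.getD n 0) with hB
  have hApair : AIdx.Pairwise (· < ·) := by
    refine List.pairwise_map.mpr ?_
    exact ((PySem.List.pairwise_lt_enumerate ks 0).filter _).imp (by intro a b h; omega)
  have hAnd : AIdx.Nodup := hApair.imp (fun h => ne_of_lt h)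
  have hBnd : BRaw.Nodup := by
    refine List.Nodup.map_on ?_ ((PySem.Set.nodup_ofList cfgList).filter _)
    intro x hx y hy hxy
    have hxk : x ∈ ks := by
      have := (List.mem_filter.mp hx).2
      rw [hcont] at this; exact of_decide_eq_true this
    have hyk : y ∈ ks := by
      have := (List.mem_filter.mp hy).2
      rw [hcont] at this; exact of_decide_eq_true this
    obtain ⟨i, hi, hix⟩ := List.mem_iff_getElem.mp hxk
    obtain ⟨j, hj, hjy⟩ := List.mem_iff_getElem.mp hyk
    rw [← hix, ← hjy, hgetD i hi, hgetD j hj] at hxy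
    have hij : i = j := by omega
    subst hij
    rw [← hix, ← hjy]
  have hmem : ∀ a : Int, a ∈ AIdx ↔ a ∈ BRaw := by
    intro a
    constructor
    · intro ha
      obtain ⟨p, hp, hpa⟩ := List.mem_map.mp ha
      obtain ⟨hpe, hpc⟩ := List.mem_filter.mp hp
      obtain ⟨k, hk, hpk⟩ := (PySem.List.mem_enumerate_iff ks 0 p).mp hpe
      refine List.mem_map.mpr ⟨p.2, List.mem_filter.mpr ⟨?_, ?_⟩, ?_⟩
      · exact (PySem.Set.mem_ofList cfgList p.2).mpr (of_decide_eq_true hpc)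
      · rw [hcont]; subst hpk; simp [List.getElem_mem hk]
      · subst hpk; simp only at hpa ⊢
        rw [hgetD k hk]; simpa using hpa
    · intro ha
      obtain ⟨n, hn, hna⟩ := List.mem_map.mp ha
      obtain ⟨hnw, hncont⟩ := List.mem_filter.mp hn
      have hnc : n ∈ cfgList := (PySem.Set.mem_ofList cfgList n).mp hnw
      have hnk : n ∈ ks := by rw [hcont] at hncont; exact of_decide_eq_true hncont
      obtain ⟨i, hi, hin⟩ := List.mem_iff_getElem.mp hnk
      refine List.mem_map.mpr ⟨((i : Int), ks[i]), List.mem_filter.mpr ⟨?_, ?_⟩, ?_⟩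
      · rw [PySem.List.mem_enumerate_iff]; exact ⟨i, hi, by simp⟩
      · simp only; rw [hin]; exact decide_eq_true hnc
      · simp only; rw [← hna, ← hin, hgetD i hi]
  have hperm : AIdx.Perm BRaw := (List.perm_ext_iff_of_nodup hAnd hBnd).mpr hmem
  have hfound : PySem.List.sorted BRaw (fun x => x) false = AIdx :=
    PySem.List.sorted_eq_of_perm_of_pairwise_lt BRaw AIdx (fun x => x) hperm hApair
  rw [hfound, hAnum, List.nil_append]


-- ===== VERDICT (by name: the statement is the Claim_ definition above) =====
theorem automation_signatures_spec : Claim_equal_automation_signatures := by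
  intro signatures config _
  exact main_eq signatures config
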